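-- pv_equiv track=rewrite | github.com/ImJAiiiii/WilProject_MR3DPrinter | Backend/assign_owner_for_catalog_db.py | _group_by_piece
-- ===== SOURCE A (Python) =====
-- from typing import Optional, Dict, List, Tuple, Set
--
-- CATALOG_PREFIX = "catalog/"
--
-- def _group_by_piece(keys: List[str]) -> Dict[str, Dict]:
--     """
--     group_id: catalog/<Model>/<Piece>/  (หรือ catalog/<Model>/ ถ้าไฟล์อยู่ราก)
--     เก็บ gcode_key เป็นตัวแทน (ถ้าชิ้นหนึ่งมีหลายไฟล์หยิบ gcode ตัวแรกพอ)
--     """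
--     groups: Dict[str, Dict] = {}
--     for key in keys:
--         if not key.startswith(CATALOG_PREFIX):
--             continue
--         parts = key.split("/")
--         if len(parts) < 3:
--             continue
--         model = parts[1]
--         piece = parts[2] if len(parts) >= 4 else ""
--         group_id = f"catalog/{model}/{piece}/" if piece else f"catalog/{model}/"
--
--         g = groups.setdefault(group_id, {
--             "model": model,
--             "piece": piece or None,
--             "gcode_key": None,
--         })
--         kl = key.lower()
--         if kl.endswith(".gcode") or kl.endswith(".gco") or kl.endswith(".gc"):
--             if g["gcode_key"] is None:
--                 g["gcode_key"] = key
--     return groups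
-- ===== SOURCE B (Python) =====
-- CATALOG_PREFIX = "catalog/"
--
-- def _group_by_piece(keys):
--     # pass 1: ordered index group_id -> list of its keys (in input order)
--     index = {}
--     for key in keys:
--         if not key.startswith(CATALOG_PREFIX):
--             continue
--         parts = key.split("/")
--         if len(parts) < 3:
--             continue
--         piece = parts[2] if len(parts) >= 4 else ""
--         group_id = f"catalog/{parts[1]}/{piece}/" if piece else f"catalog/{parts[1]}/"
--         index.setdefault(group_id, []).append(key)
--     # pass 2: assemble one record per group from its key list
--     result = {}
--     for group_id, ks in index.items():
--         parts = ks[0].split("/")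
--         piece = parts[2] if len(parts) >= 4 else ""
--         gcode_key = None
--         for k in ks:
--             kl = k.lower()
--             if kl.endswith(".gcode") or kl.endswith(".gco") or kl.endswith(".gc"):
--                 gcode_key = k
--                 break
--         result[group_id] = {"model": parts[1], "piece": piece or None, "gcode_key": gcode_key}
--     return result
-- ===== Notes on version B (the rewrite author's own statement) =====
-- stated objective: alternative
-- what changed: A builds the result in one fused pass, creating each record via dict.setdefault and mutating its gcode_key field in place per key; B instead first builds an ordered index group_id -> list of keys and then assembles each record in a second pass from its group's key list (model/piece re-derived from the group's first key, gcode_key as the first gcode-suffixed key in the list).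
import Mathlib
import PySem

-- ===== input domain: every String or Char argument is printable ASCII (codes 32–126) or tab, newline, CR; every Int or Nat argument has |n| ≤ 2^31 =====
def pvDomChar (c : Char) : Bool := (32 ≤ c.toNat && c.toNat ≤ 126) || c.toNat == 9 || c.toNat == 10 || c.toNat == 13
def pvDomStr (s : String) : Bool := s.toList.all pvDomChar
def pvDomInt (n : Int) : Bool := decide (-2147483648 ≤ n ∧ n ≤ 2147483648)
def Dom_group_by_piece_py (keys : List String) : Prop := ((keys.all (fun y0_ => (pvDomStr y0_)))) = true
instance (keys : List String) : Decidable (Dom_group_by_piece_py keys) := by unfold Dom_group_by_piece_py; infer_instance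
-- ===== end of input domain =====

-- B replaces A's single fused pass (dict of records mutated in place) by two passes: build an
-- ordered index group_id -> list of keys, then assemble each record from its group's key list.

-- ===== PORT A =====
-- Faithful transliteration of A's single loop.  parts[1]/parts[2] are guarded by the
-- `len(parts) < 3` / `>= 4` checks, so the in-range `getD` accesses are exact;
-- g["gcode_key"] always exists (the record literal defines it), so `getD` is exact.
def group_by_piece_py (keys : List String) : List (String × List (String × Option String)) :=
  let groups : PySem.Dict String (PySem.Dict String (Option String)) :=
    keys.foldl (fun groups key =>
      if ¬ (PySem.Str.startswith key "catalog/") then groups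
      else
        let parts := (PySem.Str.split? key "/").getD []   -- "/" ≠ "" so split? is always `some`
        if parts.length < 3 then groups
        else
          let model := parts.getD 1 ""
          let piece := if parts.length ≥ 4 then parts.getD 2 "" else ""
          let group_id := if piece ≠ "" then "catalog/" ++ model ++ "/" ++ piece ++ "/"
                          else "catalog/" ++ model ++ "/"
          let groups := groups.setdefault group_id
            (PySem.Dict.ofList [("model", some model),
                                ("piece", if piece = "" then none else some piece),
                                ("gcode_key", none)])
          let g := groups.getD group_id (PySem.Dict.mk [])
          let kl := PySem.Str.lower key
          if PySem.Str.endswith kl ".gcode" || PySem.Str.endswith kl ".gco" || PySem.Str.endswith kl ".gc" then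
            if g.getD "gcode_key" none = none then
              groups.insert group_id (g.insert "gcode_key" (some key))   -- g is aliased: write back
            else groups
          else groups) PySem.Dict.empty
  groups.items.map (fun p => (p.1, p.2.items))

-- ===== PORT B =====
def group_by_piece_py_alt (keys : List String) : List (String × List (String × Option String)) :=
  -- pass 1: ordered index group_id -> list of its keys (setdefault(...,[]).append = modify)
  let index : PySem.Dict String (List String) :=
    keys.foldl (fun index key =>
      if ¬ (PySem.Str.startswith key "catalog/") then index
      else
        let parts := (PySem.Str.split? key "/").getD []
        if parts.length < 3 then index
        else
          let piece := if parts.length ≥ 4 then parts.getD 2 "" else ""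
          let group_id := if piece ≠ "" then "catalog/" ++ parts.getD 1 "" ++ "/" ++ piece ++ "/"
                          else "catalog/" ++ parts.getD 1 "" ++ "/"
          index.modify group_id [] (· ++ [key])) PySem.Dict.empty
  -- pass 2: one record per group; ks is nonempty by construction so ks[0] is exact
  let result : PySem.Dict String (PySem.Dict String (Option String)) :=
    index.items.foldl (fun result p =>
      let ks := p.2
      let parts := (PySem.Str.split? (ks.getD 0 "") "/").getD []
      let piece := if parts.length ≥ 4 then parts.getD 2 "" else ""
      let gcode_key := ks.find? (fun k =>
        let kl := PySem.Str.lower k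
        PySem.Str.endswith kl ".gcode" || PySem.Str.endswith kl ".gco" || PySem.Str.endswith kl ".gc")
      result.insert p.1
        (PySem.Dict.ofList [("model", some (parts.getD 1 "")),
                            ("piece", if piece = "" then none else some piece),
                            ("gcode_key", gcode_key)])) PySem.Dict.empty
  result.items.map (fun p => (p.1, p.2.items))

-- ===== PRECONDITION & SPEC =====
def Spec_group_by_piece_py (keys : List String) (out : List (String × List (String × Option String))) : Prop := out = group_by_piece_py_alt keys
instance (keys : List String) (out : List (String × List (String × Option String))) : Decidable (Spec_group_by_piece_py keys out) := by unfold Spec_group_by_piece_py; infer_instance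

-- ===== CLAIM (what is proved, stated in full; the proofs are below) =====
def Claim_equal_group_by_piece_py : Prop := ∀ (keys : List String), Dom_group_by_piece_py keys → Spec_group_by_piece_py keys (group_by_piece_py keys)

-- ===== LEMMAS AND PROOFS =====

-- key classification shared by both ports
def isG (k : String) : Bool :=
  let kl := PySem.Str.lower k
  PySem.Str.endswith kl ".gcode" || PySem.Str.endswith kl ".gco" || PySem.Str.endswith kl ".gc"

def annot (k : String) : Option (String × String × String) :=
  if ¬ (PySem.Str.startswith k "catalog/") then none
  else
    let parts := (PySem.Str.split? k "/").getD []
    if parts.length < 3 then none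
    else
      let model := parts.getD 1 ""
      let piece := if parts.length ≥ 4 then parts.getD 2 "" else ""
      some (if piece ≠ "" then "catalog/" ++ model ++ "/" ++ piece ++ "/"
            else "catalog/" ++ model ++ "/", model, piece)

def gidOf (k : String) : Option String := (annot k).map (·.1)

def inG (gid : String) (k : String) : Bool := gidOf k == some gid

def firstG (gid : String) (ks : List String) : Option String :=
  ks.find? (fun k => inG gid k && isG k)

def mkRec (m p : String) (g : Option String) : PySem.Dict String (Option String) :=
  PySem.Dict.mk [("model", some m), ("piece", if p = "" then none else some p), ("gcode_key", g)]

def fillRec (r : PySem.Dict String (Option String)) (gid : String) (ks : List String) :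
    PySem.Dict String (Option String) :=
  if r.getD "gcode_key" none = none then
    match firstG gid ks with
    | none => r
    | some k => r.insert "gcode_key" (some k)
  else r

def newGroups : List String → List String → List (String × PySem.Dict String (Option String))
  | [], _ => []
  | k :: ks, seen =>
    match annot k with
    | none => newGroups ks seen
    | some (gid, m, p) =>
      if gid ∈ seen then newGroups ks seen
      else (gid, mkRec m p (firstG gid (k :: ks))) :: newGroups ks (gid :: seen)

def newIndex : List String → List String → List (String × List String)
  | [], _ => []
  | k :: ks, seen =>
    match gidOf k with
    | none => newIndex ks seen
    | some gid =>
      if gid ∈ seen then newIndex ks seen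
      else (gid, (k :: ks).filter (inG gid)) :: newIndex ks (gid :: seen)

lemma newGroups_cons (k : String) (t seen : List String) :
    newGroups (k :: t) seen = match annot k with
      | none => newGroups t seen
      | some (gid, m, p) =>
        if gid ∈ seen then newGroups t seen
        else (gid, mkRec m p (firstG gid (k :: t))) :: newGroups t (gid :: seen) := rfl

lemma newIndex_cons (k : String) (t seen : List String) :
    newIndex (k :: t) seen = match gidOf k with
      | none => newIndex t seen
      | some gid =>
        if gid ∈ seen then newIndex t seen
        else (gid, (k :: t).filter (inG gid)) :: newIndex t (gid :: seen) := rfl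

-- the two loop bodies and the record builder of pass 2, as named functions
def fA (groups : PySem.Dict String (PySem.Dict String (Option String))) (key : String) :
    PySem.Dict String (PySem.Dict String (Option String)) :=
  if ¬ (PySem.Str.startswith key "catalog/") then groups
  else
    let parts := (PySem.Str.split? key "/").getD []
    if parts.length < 3 then groups
    else
      let model := parts.getD 1 ""
      let piece := if parts.length ≥ 4 then parts.getD 2 "" else ""
      let group_id := if piece ≠ "" then "catalog/" ++ model ++ "/" ++ piece ++ "/"
                      else "catalog/" ++ model ++ "/"
      let groups := groups.setdefault group_id
        (PySem.Dict.ofList [("model", some model),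
                            ("piece", if piece = "" then none else some piece),
                            ("gcode_key", none)])
      let g := groups.getD group_id (PySem.Dict.mk [])
      let kl := PySem.Str.lower key
      if PySem.Str.endswith kl ".gcode" || PySem.Str.endswith kl ".gco" || PySem.Str.endswith kl ".gc" then
        if g.getD "gcode_key" none = none then
          groups.insert group_id (g.insert "gcode_key" (some key))
        else groups
      else groups

def fB (index : PySem.Dict String (List String)) (key : String) : PySem.Dict String (List String) :=
  if ¬ (PySem.Str.startswith key "catalog/") then index
  else
    let parts := (PySem.Str.split? key "/").getD []
    if parts.length < 3 then index
    else
      let piece := if parts.length ≥ 4 then parts.getD 2 "" else ""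
      let group_id := if piece ≠ "" then "catalog/" ++ parts.getD 1 "" ++ "/" ++ piece ++ "/"
                      else "catalog/" ++ parts.getD 1 "" ++ "/"
      index.modify group_id [] (· ++ [key])

def recOf (p : String × List String) : PySem.Dict String (Option String) :=
  let parts := (PySem.Str.split? (p.2.getD 0 "") "/").getD []
  let piece := if parts.length ≥ 4 then parts.getD 2 "" else ""
  PySem.Dict.mk [("model", some (parts.getD 1 "")),
                 ("piece", if piece = "" then none else some piece),
                 ("gcode_key", p.2.find? isG)]

def fR (result : PySem.Dict String (PySem.Dict String (Option String))) (p : String × List String) :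
    PySem.Dict String (PySem.Dict String (Option String)) :=
  result.insert p.1 (recOf p)

lemma ofList_triple (x y z : Option String) :
    PySem.Dict.ofList [("model", x), ("piece", y), ("gcode_key", z)]
      = PySem.Dict.mk [("model", x), ("piece", y), ("gcode_key", z)] := by
  simp [PySem.Dict.ofList, PySem.Dict.update, PySem.Dict.insert, PySem.Dict.contains,
        PySem.Dict.empty, List.foldl]


lemma portA_eq_foldA (keys : List String) :
    group_by_piece_py keys
      = (keys.foldl fA (PySem.Dict.mk [])).items.map (fun p => (p.1, p.2.items)) := by
  rfl


lemma portB_eq_folds (keys : List String) :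
    group_by_piece_py_alt keys
      = ((keys.foldl fB (PySem.Dict.mk [])).items.foldl fR (PySem.Dict.mk [])).items.map
          (fun p => (p.1, p.2.items)) := by
  rfl


lemma fA_eq (groups : PySem.Dict String (PySem.Dict String (Option String))) (k : String) :
    fA groups k = match annot k with
      | none => groups
      | some (gid, m, p) =>
        let g1 := groups.setdefault gid (mkRec m p none)
        let g := g1.getD gid (PySem.Dict.mk [])
        if isG k then
          (if g.getD "gcode_key" none = none then g1.insert gid (g.insert "gcode_key" (some k)) else g1)
        else g1 := by
  simp only [fA, annot, isG, mkRec, ofList_triple]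
  split_ifs <;> simp_all

lemma fB_eq (d : PySem.Dict String (List String)) (k : String) :
    fB d k = match gidOf k with
      | none => d
      | some gid => d.modify gid [] (· ++ [k]) := by
  simp only [fB, gidOf, annot]
  split_ifs <;> rfl

-- small Dict-as-list facts
lemma contains_mk_iff {ν : Type} (l : List (String × ν)) (k : String) :
    (PySem.Dict.mk l).contains k = true ↔ k ∈ l.map Prod.fst := by
  simp [PySem.Dict.contains, List.any_eq_true]


lemma insert_of_mem {ν : Type} (l : List (String × ν)) (k : String) (v : ν)
    (h : k ∈ l.map Prod.fst) :
    (PySem.Dict.mk l).insert k v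
      = PySem.Dict.mk (l.map (fun e => if e.1 = k then (k, v) else e)) := by
  have hc : (PySem.Dict.mk l).contains k = true := (contains_mk_iff l k).mpr h
  simp only [PySem.Dict.insert, hc, if_pos]
  congr 1
  apply List.map_congr_left
  intro e _
  by_cases he : e.1 = k <;> simp [he]


lemma insert_of_not_mem {ν : Type} (l : List (String × ν)) (k : String) (v : ν)
    (h : ¬ k ∈ l.map Prod.fst) :
    (PySem.Dict.mk l).insert k v = PySem.Dict.mk (l ++ [(k, v)]) := by
  have hc : ¬ (PySem.Dict.mk l).contains k = true := fun hh => h ((contains_mk_iff l k).mp hh)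
  simp only [PySem.Dict.insert]
  rw [if_neg hc]


lemma find?_fst_nodup {ν : Type} {l : List (String × ν)} (h : (l.map Prod.fst).Nodup)
    {gid : String} {r : ν} (hm : (gid, r) ∈ l) :
    l.find? (fun p => p.1 == gid) = some (gid, r) := by
  induction l with
  | nil => cases hm
  | cons a t ih =>
    simp only [List.map_cons, List.nodup_cons] at h
    rcases List.mem_cons.mp hm with hm | hm
    · subst hm
      simp
    · have hgt : gid ∈ t.map Prod.fst := List.mem_map.mpr ⟨(gid, r), hm, rfl⟩
      have hne : (a.1 == gid) = false := by
        simp only [beq_eq_false_iff_ne, ne_eq]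
        intro he; exact h.1 (he ▸ hgt)
      rw [List.find?_cons, hne]
      exact ih h.2 hm


lemma get?_append_fresh {ν : Type} (l : List (String × ν)) (k : String) (v : ν)
    (h : ¬ k ∈ l.map Prod.fst) :
    (PySem.Dict.mk (l ++ [(k, v)])).get? k = some v := by
  simp only [PySem.Dict.get?]
  rw [List.find?_append]
  have hn : l.find? (fun p => p.1 == k) = none := by
    rw [List.find?_eq_none]
    intro p hp
    simp only [beq_iff_eq]
    intro he; exact h (List.mem_map.mpr ⟨p, hp, he⟩)
  simp [hn]


-- record-shape computations
lemma mkRec_getD (m p : String) (g : Option String) :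
    (mkRec m p g).getD "gcode_key" none = g := by
  simp [mkRec, PySem.Dict.getD, PySem.Dict.get?, List.find?]


lemma mkRec_insert (m p : String) (g g' : Option String) :
    (mkRec m p g).insert "gcode_key" g' = mkRec m p g' := by
  simp [mkRec, PySem.Dict.insert, PySem.Dict.contains]


-- firstG / fillRec facts
lemma inG_of_annot {k gid : String} {m p : String} (h : annot k = some (gid, m, p)) :
    inG gid k = true := by
  simp [inG, gidOf, h]


lemma inG_ne {k gid gid' : String} {m p : String} (h : annot k = some (gid, m, p))
    (hne : gid' ≠ gid) : inG gid' k = false := by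
  simp [inG, gidOf, h]
  exact fun he => hne he.symm


lemma inG_of_annot_none {k gid : String} (h : annot k = none) : inG gid k = false := by
  simp [inG, gidOf, h]


lemma firstG_cons (gid k : String) (ks : List String) :
    firstG gid (k :: ks) = if inG gid k && isG k then some k else firstG gid ks := by
  simp only [firstG, List.find?_cons]
  cases h : (inG gid k && isG k) <;> simp


lemma fillRec_nil (r : PySem.Dict String (Option String)) (gid : String) :
    fillRec r gid [] = r := by
  unfold fillRec firstG
  simp


lemma fillRec_skip (r : PySem.Dict String (Option String)) (gid k : String) (ks : List String)
    (h : (inG gid k && isG k) = false) : fillRec r gid (k :: ks) = fillRec r gid ks := by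
  unfold fillRec
  rw [firstG_cons, h]
  simp


lemma find?_isG_filter (gid : String) (ks : List String) :
    (ks.filter (inG gid)).find? isG = ks.find? (fun k => inG gid k && isG k) := by
  induction ks with
  | nil => rfl
  | cons k t ih =>
    by_cases h : inG gid k
    · by_cases h2 : isG k <;> simp [h, h2, ih]
    · simp [h, ih]


lemma inG_of_gidOf_none {k gid : String} (h : gidOf k = none) : inG gid k = false := by
  simp [inG, h]

lemma inG_of_gidOf {k gid : String} (h : gidOf k = some gid) : inG gid k = true := by
  simp [inG, h]

lemma inG_ne' {k gid gid' : String} (h : gidOf k = some gid) (hne : gid' ≠ gid) :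
    inG gid' k = false := by
  simp [inG, h]
  exact fun he => hne he.symm

-- seen-set congruence
lemma newGroups_congr (ks : List String) : ∀ (s₁ s₂ : List String),
    (∀ g, g ∈ s₁ ↔ g ∈ s₂) → newGroups ks s₁ = newGroups ks s₂ := by
  induction ks with
  | nil => intro _ _ _; rfl
  | cons k t ih =>
    intro s₁ s₂ hiff
    unfold newGroups
    cases h : annot k with
    | none => exact ih _ _ hiff
    | some x =>
      obtain ⟨gid, m, p⟩ := x
      simp only
      by_cases hg : gid ∈ s₁
      · rw [if_pos hg, if_pos ((hiff gid).mp hg)]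
        exact ih _ _ hiff
      · rw [if_neg hg, if_neg (fun hh => hg ((hiff gid).mpr hh))]
        congr 1
        exact ih _ _ (by intro g; simp [hiff g])


lemma newIndex_congr (ks : List String) : ∀ (s₁ s₂ : List String),
    (∀ g, g ∈ s₁ ↔ g ∈ s₂) → newIndex ks s₁ = newIndex ks s₂ := by
  induction ks with
  | nil => intro _ _ _; rfl
  | cons k t ih =>
    intro s₁ s₂ hiff
    unfold newIndex
    cases h : gidOf k with
    | none => exact ih _ _ hiff
    | some gid =>
      simp only
      by_cases hg : gid ∈ s₁
      · rw [if_pos hg, if_pos ((hiff gid).mp hg)]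
        exact ih _ _ hiff
      · rw [if_neg hg, if_neg (fun hh => hg ((hiff gid).mpr hh))]
        congr 1
        exact ih _ _ (by intro g; simp [hiff g])


lemma map_self {α : Type} (l : List α) (f : α → α) (h : ∀ e ∈ l, f e = e) : l.map f = l := by
  induction l with
  | nil => rfl
  | cons a t ih =>
    simp only [List.map_cons, h a (by simp)]
    rw [ih (fun e he => h e (by simp [he]))]

def updK (k : String) (r : PySem.Dict String (Option String)) : PySem.Dict String (Option String) :=
  if isG k = true ∧ r.getD "gcode_key" none = none then r.insert "gcode_key" (some k) else r

lemma fill_upd {gid k : String} {ks : List String} {r : PySem.Dict String (Option String)}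
    (hk : inG gid k = true) : fillRec (updK k r) gid ks = fillRec r gid (k :: ks) := by
  unfold updK fillRec
  rw [firstG_cons, hk, Bool.true_and]
  by_cases hG : isG k <;> by_cases hn : r.getD "gcode_key" none = none <;>
    simp [hG, hn, PySem.Dict.getD_insert_self]

lemma fill_new {gid m p k : String} {ks : List String} (hk : inG gid k = true) :
    fillRec (mkRec m p (if isG k then some k else none)) gid ks
      = mkRec m p (firstG gid (k :: ks)) := by
  unfold fillRec
  rw [firstG_cons, hk, Bool.true_and]
  by_cases hG : isG k
  · rw [if_pos hG, if_pos hG, mkRec_getD, if_neg (by simp)]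
  · rw [if_neg hG, if_neg hG, mkRec_getD, if_pos rfl]
    cases hf : firstG gid ks with
    | none => rfl
    | some k' => simp only; rw [mkRec_insert]

lemma fst_map_replace {ν : Type} (l : List (String × ν)) (gid : String)
    (f : String × ν → String × ν) (hf : ∀ e, e.1 = gid → (f e).1 = e.1) :
    ((l.map (fun e => if e.1 = gid then f e else e)).map Prod.fst) = l.map Prod.fst := by
  rw [List.map_map]
  apply List.map_congr_left
  intro e _
  by_cases he : e.1 = gid <;> simp [he, hf e]

lemma get?_of_not_mem {ν : Type} (l : List (String × ν)) (k : String)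
    (h : ¬ k ∈ l.map Prod.fst) : (PySem.Dict.mk l).get? k = none := by
  simp only [PySem.Dict.get?, Option.map_eq_none_iff]
  rw [List.find?_eq_none]
  intro p hp
  simp only [beq_iff_eq]
  intro he; exact h (List.mem_map.mpr ⟨p, hp, he⟩)

lemma stepA_present {l : List (String × PySem.Dict String (Option String))}
    (hnd : (l.map Prod.fst).Nodup) {gid m p k : String}
    (h : annot k = some (gid, m, p)) (hg : gid ∈ l.map Prod.fst) :
    fA (PySem.Dict.mk l) k
      = PySem.Dict.mk (l.map (fun e => if e.1 = gid then (gid, updK k e.2) else e)) := by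
  obtain ⟨e0, he0, hfst⟩ := List.mem_map.mp hg
  have hr : (gid, e0.2) ∈ l := by rw [← hfst, Prod.mk.eta]; exact he0
  have hget : (PySem.Dict.mk l).getD gid (PySem.Dict.mk []) = e0.2 := by
    simp [PySem.Dict.getD, PySem.Dict.get?, find?_fst_nodup hnd hr]
  rw [fA_eq, h]
  simp only
  rw [PySem.Dict.setdefault_of_contains _ _ ((contains_mk_iff l gid).mpr hg), hget]
  by_cases hG : isG k
  · rw [if_pos hG]
    by_cases hn : e0.2.getD "gcode_key" none = none
    · rw [if_pos hn, insert_of_mem _ _ _ hg]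
      congr 1
      apply List.map_congr_left
      intro e he
      by_cases hegid : e.1 = gid
      · have hre : (gid, e.2) ∈ l := by rw [← hegid, Prod.mk.eta]; exact he
        have : e.2 = e0.2 := by
          have h1 := find?_fst_nodup hnd hre
          have h2 := find?_fst_nodup hnd hr
          rw [h1] at h2
          simpa using h2
        rw [if_pos hegid, if_pos hegid, this]
        unfold updK
        rw [if_pos ⟨hG, hn⟩]
      · rw [if_neg hegid, if_neg hegid]
    · rw [if_neg hn]
      nth_rewrite 1 [show l = l.map (fun e => if e.1 = gid then (gid, updK k e.2) else e) from ?_]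
      · rfl
      · symm
        apply map_self
        intro e he
        by_cases hegid : e.1 = gid
        · have hre : (gid, e.2) ∈ l := by rw [← hegid, Prod.mk.eta]; exact he
          have he2 : e.2 = e0.2 := by
            have h1 := find?_fst_nodup hnd hre
            have h2 := find?_fst_nodup hnd hr
            rw [h1] at h2
            simpa using h2
          rw [if_pos hegid]
          unfold updK
          rw [if_neg (by simp [he2, hn]), ← hegid]
        · rw [if_neg hegid]
  · rw [if_neg hG]
    nth_rewrite 1 [show l = l.map (fun e => if e.1 = gid then (gid, updK k e.2) else e) from ?_]
    · rfl
    · symm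
      apply map_self
      intro e he
      by_cases hegid : e.1 = gid
      · rw [if_pos hegid]
        unfold updK
        rw [if_neg (by simp [hG]), ← hegid]
      · rw [if_neg hegid]

lemma stepA_fresh {l : List (String × PySem.Dict String (Option String))}
    {gid m p k : String} (h : annot k = some (gid, m, p)) (hg : ¬ gid ∈ l.map Prod.fst) :
    fA (PySem.Dict.mk l) k
      = PySem.Dict.mk (l ++ [(gid, mkRec m p (if isG k then some k else none))]) := by
  have hc : (PySem.Dict.mk l).contains gid = false := by
    rw [← Bool.not_eq_true]
    exact fun hh => hg ((contains_mk_iff l gid).mp hh)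
  rw [fA_eq, h]
  simp only
  rw [PySem.Dict.setdefault_of_not_contains _ _ hc]
  have hins : (PySem.Dict.mk l).insert gid (mkRec m p none)
      = PySem.Dict.mk (l ++ [(gid, mkRec m p none)]) := insert_of_not_mem l gid _ hg
  rw [hins]
  have hget : (PySem.Dict.mk (l ++ [(gid, mkRec m p none)])).getD gid (PySem.Dict.mk [])
      = mkRec m p none := by
    simp [PySem.Dict.getD, get?_append_fresh l gid _ hg]
  rw [hget]
  by_cases hG : isG k
  · rw [if_pos hG, mkRec_getD, if_pos rfl, mkRec_insert,
        insert_of_mem _ _ _ (by simp), if_pos hG]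
    congr 1
    rw [List.map_append]
    congr 1
    · apply map_self
      intro e he
      rw [if_neg (fun hh => hg (List.mem_map.mpr ⟨e, he, hh⟩))]
    · simp
  · rw [if_neg hG, if_neg (by simp [hG])]

lemma stepB_present {l : List (String × List String)} (hnd : (l.map Prod.fst).Nodup)
    {gid k : String} (h : gidOf k = some gid) (hg : gid ∈ l.map Prod.fst) :
    fB (PySem.Dict.mk l) k
      = PySem.Dict.mk (l.map (fun e => if e.1 = gid then (gid, e.2 ++ [k]) else e)) := by
  obtain ⟨e0, he0, hfst⟩ := List.mem_map.mp hg
  have hr : (gid, e0.2) ∈ l := by rw [← hfst, Prod.mk.eta]; exact he0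
  have hget : (PySem.Dict.mk l).getD gid [] = e0.2 := by
    simp [PySem.Dict.getD, PySem.Dict.get?, find?_fst_nodup hnd hr]
  rw [fB_eq, h]
  simp only [PySem.Dict.modify]
  rw [hget, insert_of_mem _ _ _ hg]
  congr 1
  apply List.map_congr_left
  intro e he
  by_cases hegid : e.1 = gid
  · have hre : (gid, e.2) ∈ l := by rw [← hegid, Prod.mk.eta]; exact he
    have : e.2 = e0.2 := by
      have h1 := find?_fst_nodup hnd hre
      have h2 := find?_fst_nodup hnd hr
      rw [h1] at h2
      simpa using h2
    rw [if_pos hegid, if_pos hegid, this]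
  · rw [if_neg hegid, if_neg hegid]

lemma stepB_fresh {l : List (String × List String)} {gid k : String}
    (h : gidOf k = some gid) (hg : ¬ gid ∈ l.map Prod.fst) :
    fB (PySem.Dict.mk l) k = PySem.Dict.mk (l ++ [(gid, [k])]) := by
  rw [fB_eq, h]
  simp only [PySem.Dict.modify]
  rw [show (PySem.Dict.mk l).getD gid [] = [] by simp [PySem.Dict.getD, get?_of_not_mem l gid hg]]
  exact insert_of_not_mem l gid _ hg

-- main characterization of A's fold
lemma foldA_char (ks : List String) :
    ∀ (l : List (String × PySem.Dict String (Option String))), (l.map Prod.fst).Nodup →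
    (ks.foldl fA (PySem.Dict.mk l)).items
      = l.map (fun e => (e.1, fillRec e.2 e.1 ks)) ++ newGroups ks (l.map Prod.fst) := by
  induction ks with
  | nil =>
    intro l _
    simp only [List.foldl_nil, newGroups, List.append_nil]
    symm
    apply map_self
    intro e _
    rw [fillRec_nil]
  | cons k t ih =>
    intro l hnd
    rw [List.foldl_cons]
    cases h : annot k with
    | none =>
      have hstep : fA (PySem.Dict.mk l) k = PySem.Dict.mk l := by rw [fA_eq, h]
      have hng : newGroups (k :: t) (l.map Prod.fst) = newGroups t (l.map Prod.fst) := by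
        simp only [newGroups_cons, h]
      rw [hstep, ih l hnd, hng]
      congr 1
      apply List.map_congr_left
      intro e _
      rw [fillRec_skip _ _ _ _ (by simp [inG_of_annot_none h])]
    | some x =>
      obtain ⟨gid, m, p⟩ := x
      have hk : inG gid k = true := inG_of_annot h
      by_cases hg : gid ∈ l.map Prod.fst
      · have hnd' : (((l.map (fun e => if e.1 = gid then (gid, updK k e.2) else e)).map Prod.fst)).Nodup := by
          rw [fst_map_replace l gid (fun e => (gid, updK k e.2)) (fun _ he => he.symm)]; exact hnd
        have hng : newGroups (k :: t) (l.map Prod.fst) = newGroups t (l.map Prod.fst) := by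
          simp only [newGroups_cons, h]; rw [if_pos hg]
        rw [stepA_present hnd h hg, ih _ hnd', fst_map_replace l gid (fun e => (gid, updK k e.2)) (fun _ he => he.symm), hng]
        congr 1
        rw [List.map_map]
        apply List.map_congr_left
        intro e _
        simp only [Function.comp_apply]
        by_cases hegid : e.1 = gid
        · rw [if_pos hegid]
          show (gid, fillRec (updK k e.2) gid t) = (e.1, fillRec e.2 e.1 (k :: t))
          rw [hegid, fill_upd hk]
        · rw [if_neg hegid]
          show (e.1, fillRec e.2 e.1 t) = (e.1, fillRec e.2 e.1 (k :: t))
          rw [fillRec_skip _ _ _ _ (by simp [inG_ne h hegid])]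
      · have hnd' : (((l ++ [(gid, mkRec m p (if isG k then some k else none))]).map Prod.fst)).Nodup := by
          simp only [List.map_append, List.map_cons, List.map_nil, List.nodup_append]
          refine ⟨hnd, by simp, ?_⟩
          intro a ha b hb hab
          exact hg ((hab.trans (List.mem_singleton.mp hb)) ▸ ha)
        have hng : newGroups (k :: t) (l.map Prod.fst)
            = (gid, mkRec m p (firstG gid (k :: t))) :: newGroups t (gid :: l.map Prod.fst) := by
          simp only [newGroups_cons, h]; rw [if_neg hg]
        rw [stepA_fresh h hg, ih _ hnd', hng]
        rw [show ((l ++ [(gid, mkRec m p (if isG k then some k else none))]).map Prod.fst)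
              = l.map Prod.fst ++ [gid] by simp]
        rw [newGroups_congr t (l.map Prod.fst ++ [gid]) (gid :: l.map Prod.fst) (by intro g; simp [or_comm])]
        rw [List.map_append, List.append_assoc]
        congr 1
        · apply List.map_congr_left
          intro e he
          have hene : e.1 ≠ gid := fun hh => hg (List.mem_map.mpr ⟨e, he, hh⟩)
          rw [fillRec_skip _ _ _ _ (by simp [inG_ne h hene])]
        · rw [List.map_cons, List.map_nil, List.singleton_append, fill_new hk]

-- main characterization of B's first pass
lemma foldB_char (ks : List String) :
    ∀ (l : List (String × List String)), (l.map Prod.fst).Nodup →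
    (ks.foldl fB (PySem.Dict.mk l)).items
      = l.map (fun e => (e.1, e.2 ++ ks.filter (inG e.1))) ++ newIndex ks (l.map Prod.fst) := by
  induction ks with
  | nil =>
    intro l _
    simp only [List.foldl_nil, newIndex, List.append_nil, List.filter_nil]
    symm
    apply map_self
    intro e _
    simp
  | cons k t ih =>
    intro l hnd
    rw [List.foldl_cons]
    cases h : gidOf k with
    | none =>
      have hstep : fB (PySem.Dict.mk l) k = PySem.Dict.mk l := by rw [fB_eq, h]
      have hni : newIndex (k :: t) (l.map Prod.fst) = newIndex t (l.map Prod.fst) := by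
        simp only [newIndex_cons, h]
      rw [hstep, ih l hnd, hni]
      congr 1
      apply List.map_congr_left
      intro e _
      rw [List.filter_cons_of_neg (by simp [inG_of_gidOf_none h])]
    | some gid =>
      have hk : inG gid k = true := inG_of_gidOf h
      by_cases hg : gid ∈ l.map Prod.fst
      · have hnd' : (((l.map (fun e => if e.1 = gid then (gid, e.2 ++ [k]) else e)).map Prod.fst)).Nodup := by
          rw [fst_map_replace l gid (fun e => (gid, e.2 ++ [k])) (fun _ he => he.symm)]; exact hnd
        have hni : newIndex (k :: t) (l.map Prod.fst) = newIndex t (l.map Prod.fst) := by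
          simp only [newIndex_cons, h]; rw [if_pos hg]
        rw [stepB_present hnd h hg, ih _ hnd', fst_map_replace l gid (fun e => (gid, e.2 ++ [k])) (fun _ he => he.symm), hni]
        congr 1
        rw [List.map_map]
        apply List.map_congr_left
        intro e _
        simp only [Function.comp_apply]
        by_cases hegid : e.1 = gid
        · rw [if_pos hegid]
          show (gid, (e.2 ++ [k]) ++ t.filter (inG gid)) = (e.1, e.2 ++ (k :: t).filter (inG e.1))
          rw [hegid, List.filter_cons_of_pos hk, List.append_assoc, List.singleton_append]
        · rw [if_neg hegid]
          show (e.1, e.2 ++ t.filter (inG e.1)) = (e.1, e.2 ++ (k :: t).filter (inG e.1))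
          rw [List.filter_cons_of_neg (by simp [inG_ne' h hegid])]
      · have hnd' : (((l ++ [(gid, [k])]).map Prod.fst)).Nodup := by
          simp only [List.map_append, List.map_cons, List.map_nil, List.nodup_append]
          refine ⟨hnd, by simp, ?_⟩
          intro a ha b hb hab
          exact hg ((hab.trans (List.mem_singleton.mp hb)) ▸ ha)
        have hni : newIndex (k :: t) (l.map Prod.fst)
            = (gid, (k :: t).filter (inG gid)) :: newIndex t (gid :: l.map Prod.fst) := by
          simp only [newIndex_cons, h]; rw [if_neg hg]
        rw [stepB_fresh h hg, ih _ hnd', hni]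
        rw [show ((l ++ [(gid, [k])]).map Prod.fst) = l.map Prod.fst ++ [gid] by simp]
        rw [newIndex_congr t (l.map Prod.fst ++ [gid]) (gid :: l.map Prod.fst) (by intro g; simp [or_comm])]
        rw [List.map_append, List.append_assoc]
        congr 1
        · apply List.map_congr_left
          intro e he
          have hene : e.1 ≠ gid := fun hh => hg (List.mem_map.mpr ⟨e, he, hh⟩)
          rw [List.filter_cons_of_neg (by simp [inG_ne' h hene])]
        · rw [List.map_cons, List.map_nil, List.singleton_append,
              List.filter_cons_of_pos hk]
          rfl

lemma newIndex_fst (ks : List String) : ∀ (seen : List String),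
    ((newIndex ks seen).map Prod.fst).Nodup ∧
    ∀ g ∈ (newIndex ks seen).map Prod.fst, g ∉ seen := by
  induction ks with
  | nil => intro seen; simp [newIndex]
  | cons k t ih =>
    intro seen
    cases h : gidOf k with
    | none => rw [show newIndex (k :: t) seen = newIndex t seen by simp only [newIndex_cons, h]]
              exact ih seen
    | some gid =>
      by_cases hg : gid ∈ seen
      · rw [show newIndex (k :: t) seen = newIndex t seen by simp only [newIndex_cons, h]; rw [if_pos hg]]
        exact ih seen
      · rw [show newIndex (k :: t) seen
              = (gid, (k :: t).filter (inG gid)) :: newIndex t (gid :: seen) by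
            simp only [newIndex_cons, h]; rw [if_neg hg]]
        obtain ⟨hnd, hnotin⟩ := ih (gid :: seen)
        constructor
        · simp only [List.map_cons, List.nodup_cons]
          exact ⟨fun hmem => (hnotin _ hmem) (by simp), hnd⟩
        · intro g hgmem
          simp only [List.map_cons, List.mem_cons] at hgmem
          rcases hgmem with rfl | hgmem
          · exact hg
          · intro hgs; exact (hnotin g hgmem) (by simp [hgs])

-- B's second pass over a fresh-keyed list just appends the records
lemma foldR_char (ps : List (String × List String)) :
    ∀ (l : List (String × PySem.Dict String (Option String))),
    (∀ p ∈ ps, p.1 ∉ l.map Prod.fst) → (ps.map Prod.fst).Nodup →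
    (ps.foldl fR (PySem.Dict.mk l)).items = l ++ ps.map (fun p => (p.1, recOf p)) := by
  induction ps with
  | nil => intro l _ _; simp
  | cons p ps ih =>
    intro l h1 h2
    rw [List.foldl_cons]
    have hstep : fR (PySem.Dict.mk l) p = PySem.Dict.mk (l ++ [(p.1, recOf p)]) :=
      insert_of_not_mem l p.1 _ (h1 p (by simp))
    rw [hstep, ih (l ++ [(p.1, recOf p)]) ?h1' ?h2']
    · simp
    case h1' =>
      intro q hq
      simp only [List.map_append, List.mem_append, List.map_cons, List.map_nil]
      rintro (hql | hqp)
      · exact h1 q (by simp [hq]) hql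
      · simp only [List.mem_singleton] at hqp
        simp only [List.map_cons, List.nodup_cons] at h2
        exact h2.1 (hqp ▸ List.mem_map.mpr ⟨q, hq, rfl⟩)
    case h2' =>
      simp only [List.map_cons, List.nodup_cons] at h2
      exact h2.2

-- the records A carries and the records B assembles coincide, group by group
lemma newGroups_eq_newIndex (ks : List String) : ∀ (seen : List String),
    newGroups ks seen = (newIndex ks seen).map (fun p => (p.1, recOf p)) := by
  induction ks with
  | nil => intro _; rfl
  | cons k t ih =>
    intro seen
    cases h : annot k with
    | none =>
      have hg : gidOf k = none := by simp [gidOf, h]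
      rw [show newGroups (k :: t) seen = newGroups t seen by simp only [newGroups_cons, h],
          show newIndex (k :: t) seen = newIndex t seen by simp only [newIndex_cons, hg]]
      exact ih seen
    | some x =>
      obtain ⟨gid, m, p⟩ := x
      have hg' : gidOf k = some gid := by simp [gidOf, h]
      by_cases hseen : gid ∈ seen
      · rw [show newGroups (k :: t) seen = newGroups t seen by
            simp only [newGroups_cons, h]; rw [if_pos hseen],
          show newIndex (k :: t) seen = newIndex t seen by
            simp only [newIndex_cons, hg']; rw [if_pos hseen]]
        exact ih seen
      · rw [show newGroups (k :: t) seen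
              = (gid, mkRec m p (firstG gid (k :: t))) :: newGroups t (gid :: seen) by
            simp only [newGroups_cons, h]; rw [if_neg hseen],
          show newIndex (k :: t) seen
              = (gid, (k :: t).filter (inG gid)) :: newIndex t (gid :: seen) by
            simp only [newIndex_cons, hg']; rw [if_neg hseen],
          List.map_cons]
        congr 1
        · have hk : inG gid k = true := inG_of_gidOf hg'
          have hfil : (k :: t).filter (inG gid) = k :: t.filter (inG gid) :=
            List.filter_cons_of_pos hk
          have hfind : ((k :: t).filter (inG gid)).find? isG = firstG gid (k :: t) :=
            find?_isG_filter gid (k :: t)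
          unfold recOf
          dsimp only
          rw [hfind, hfil]
          have hmp : m = ((PySem.Str.split? k "/").getD []).getD 1 ""
              ∧ p = (if ((PySem.Str.split? k "/").getD []).length ≥ 4
                     then ((PySem.Str.split? k "/").getD []).getD 2 "" else "") := by
            have h' := h
            unfold annot at h'
            split_ifs at h'
            simp_all
          obtain ⟨hm, hp⟩ := hmp
          subst hm
          subst hp
          rfl
        · exact ih (gid :: seen)

-- ===== VERDICT (by name: the statement is the Claim_ definition above) =====
theorem group_by_piece_py_spec : Claim_equal_group_by_piece_py := by
  intro keys _
  show group_by_piece_py keys = group_by_piece_py_alt keys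
  rw [portA_eq_foldA, portB_eq_folds, foldA_char keys [] (by simp),
      foldB_char keys [] (by simp)]
  simp only [List.map_nil, List.nil_append]
  rw [foldR_char _ [] (by simp) (newIndex_fst keys []).1, newGroups_eq_newIndex]
  simp [List.map_map]
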